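-- pv_equiv track=rewrite | github.com/rbirenTHOR/rv_trader | src/complete/thor_report_html.py | calculate_tier_ceilings
-- ===== SOURCE A (Python) =====
-- from typing import Optional, Dict, List, Any
--
-- def calculate_tier_ceilings(listings: List[Dict]) -> Dict[str, int]:
--     top_premium_ranks = [l['rank'] for l in listings if l.get('is_top_premium') and l.get('rank')]
--     premium_ranks = [l['rank'] for l in listings if l.get('is_premium') and l.get('rank')]
--
--     top_premium_ceiling = 1
--     premium_ceiling = max(top_premium_ranks) + 1 if top_premium_ranks else 1
--     standard_ceiling = max(premium_ranks) + 1 if premium_ranks else 1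
--
--     return {
--         'top_premium': top_premium_ceiling,
--         'premium': premium_ceiling,
--         'standard': standard_ceiling,
--     }
-- ===== SOURCE B (Python) =====
-- def calculate_tier_ceilings(listings):
--     # Divide-and-conquer: recursively split the list in half, compute the pair of
--     # (top-premium max rank, premium max rank) for each half, merge with pick.
--     def pick(a, b):
--         if a is None:
--             return b
--         if b is None:
--             return a
--         return a if a >= b else b
--
--     def maxima(lst):
--         if not lst:
--             return (None, None)
--         if len(lst) == 1:
--             l = lst[0]
--             r = l.get('rank')
--             if not r:
--                 return (None, None)
--             return (r if l.get('is_top_premium') else None,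
--                     r if l.get('is_premium') else None)
--         mid = len(lst) // 2
--         left = maxima(lst[:mid])
--         right = maxima(lst[mid:])
--         return (pick(left[0], right[0]), pick(left[1], right[1]))
--
--     tp, p = maxima(listings)
--     return {
--         'top_premium': 1,
--         'premium': tp + 1 if tp is not None else 1,
--         'standard': p + 1 if p is not None else 1,
--     }
-- ===== Notes on version B (the rewrite author's own statement) =====
-- stated objective: alternative
-- what changed: Replaces the two filtered list comprehensions plus max() calls by a divide-and-conquer recursion that splits the listings list in half and merges per-tier optional maxima with a pick combinator, producing the same ceilings.
import Mathlib
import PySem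

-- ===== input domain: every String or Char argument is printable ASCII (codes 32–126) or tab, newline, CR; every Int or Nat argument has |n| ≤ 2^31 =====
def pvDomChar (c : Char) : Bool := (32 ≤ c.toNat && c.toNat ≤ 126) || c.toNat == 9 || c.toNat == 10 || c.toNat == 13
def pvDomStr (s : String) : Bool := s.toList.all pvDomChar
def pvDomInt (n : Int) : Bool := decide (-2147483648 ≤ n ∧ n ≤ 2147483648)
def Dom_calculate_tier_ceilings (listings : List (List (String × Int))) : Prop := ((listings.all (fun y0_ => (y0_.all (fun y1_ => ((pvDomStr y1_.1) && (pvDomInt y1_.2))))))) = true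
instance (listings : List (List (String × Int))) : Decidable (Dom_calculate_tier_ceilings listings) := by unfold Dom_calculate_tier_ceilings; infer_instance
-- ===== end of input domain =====

-- B: divide-and-conquer over the listings list (split in half, merge optional per-tier maxima) instead of two filtered comprehensions plus max(); same return value.


-- ===== PORT A =====
-- truthiness of l.get(k): value present and nonzero
def pvTruthy (o : Option Int) : Bool :=
  match o with
  | some v => v != 0
  | none => false

def calculate_tier_ceilings (listings : List (List (String × Int))) : List (String × Int) :=
  -- [l['rank'] for l in listings if l.get('is_top_premium') and l.get('rank')]
  -- (the filter guarantees 'rank' is present, so .getD 0 is exact for l['rank'])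
  let top_premium_ranks :=
    (listings.filter (fun l => pvTruthy (List.lookup "is_top_premium" l) && pvTruthy (List.lookup "rank" l))).map
      (fun l => (List.lookup "rank" l).getD 0)
  let premium_ranks :=
    (listings.filter (fun l => pvTruthy (List.lookup "is_premium" l) && pvTruthy (List.lookup "rank" l))).map
      (fun l => (List.lookup "rank" l).getD 0)
  let top_premium_ceiling : Int := 1
  let premium_ceiling : Int :=
    if top_premium_ranks ≠ [] then (PySem.List.max? top_premium_ranks (fun y => y)).getD 0 + 1 else 1
  let standard_ceiling : Int :=
    if premium_ranks ≠ [] then (PySem.List.max? premium_ranks (fun y => y)).getD 0 + 1 else 1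
  [("top_premium", top_premium_ceiling), ("premium", premium_ceiling), ("standard", standard_ceiling)]

-- ===== PORT B =====
-- pick(a, b): None-absorbing maximum, left-biased on ties (Source B's pick)
def pvPick (a b : Option Int) : Option Int :=
  match a with
  | none => b
  | some x =>
    match b with
    | none => some x
    | some y => if x ≥ y then some x else some y

-- maxima(lst): divide and conquer on the list, as in Source B
def pvMaxima : List (List (String × Int)) → Option Int × Option Int
  | [] => (none, none)
  | [l] =>
    match List.lookup "rank" l with
    | some r =>
      if r ≠ 0 then
        ((if pvTruthy (List.lookup "is_top_premium" l) then some r else none),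
         (if pvTruthy (List.lookup "is_premium" l) then some r else none))
      else (none, none)
    | none => (none, none)
  | a :: b :: t =>
    let lst := a :: b :: t
    let mid := lst.length / 2
    let left := pvMaxima (lst.take mid)
    let right := pvMaxima (lst.drop mid)
    (pvPick left.1 right.1, pvPick left.2 right.2)
termination_by lst => lst.length
decreasing_by
  · simp; omega
  · simp; omega

def calculate_tier_ceilings_alt (listings : List (List (String × Int))) : List (String × Int) :=
  let s := pvMaxima listings
  [("top_premium", (1 : Int)),
   ("premium", match s.1 with | some m => m + 1 | none => 1),
   ("standard", match s.2 with | some m => m + 1 | none => 1)]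

-- ===== PRECONDITION & SPEC =====
def Spec_calculate_tier_ceilings (listings : List (List (String × Int))) (out : List (String × Int)) : Prop := out = calculate_tier_ceilings_alt listings
instance (listings : List (List (String × Int))) (out : List (String × Int)) : Decidable (Spec_calculate_tier_ceilings listings out) := by unfold Spec_calculate_tier_ceilings; infer_instance

-- ===== CLAIM (what is proved, stated in full; the proofs are below) =====
def Claim_equal_calculate_tier_ceilings : Prop := ∀ (listings : List (List (String × Int))), Dom_calculate_tier_ceilings listings → Spec_calculate_tier_ceilings listings (calculate_tier_ceilings listings)

-- ===== LEMMAS AND PROOFS =====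

-- proof-side abbreviations for A's two rank lists
def pvTP (listings : List (List (String × Int))) : List Int :=
  (listings.filter (fun l => pvTruthy (List.lookup "is_top_premium" l) && pvTruthy (List.lookup "rank" l))).map
    (fun l => (List.lookup "rank" l).getD 0)

def pvPR (listings : List (List (String × Int))) : List Int :=
  (listings.filter (fun l => pvTruthy (List.lookup "is_premium" l) && pvTruthy (List.lookup "rank" l))).map
    (fun l => (List.lookup "rank" l).getD 0)

-- optional maximum of a list, as a fold
def pvLMax (xs : List Int) : Option Int :=
  xs.foldl (fun o r => pvPick o (some r)) none

theorem pvPick_none_right (a : Option Int) : pvPick a none = a := by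
  cases a <;> rfl

theorem pvPick_none_left (b : Option Int) : pvPick none b = b := rfl

theorem pvPick_some (x y : Int) : pvPick (some x) (some y) = some (max x y) := by
  simp only [pvPick, max_def]
  split_ifs <;> simp <;> omega

theorem pvPick_assoc (a b c : Option Int) : pvPick (pvPick a b) c = pvPick a (pvPick b c) := by
  cases a <;> cases b <;> cases c <;>
    simp [pvPick_none_right, pvPick_none_left, pvPick_some, max_assoc]

theorem pvFoldPick (xs : List Int) (o : Option Int) :
    xs.foldl (fun o r => pvPick o (some r)) o = pvPick o (pvLMax xs) := by
  induction xs generalizing o with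
  | nil => simp [pvLMax, pvPick_none_right]
  | cons r t ih =>
    have h1 : pvLMax (r :: t) = pvPick (some r) (pvLMax t) := by
      show List.foldl _ (pvPick none (some r)) t = _
      rw [ih]
      rfl
    simp only [List.foldl_cons]
    rw [ih, h1, pvPick_assoc]

theorem pvLMax_append (xs ys : List Int) :
    pvLMax (xs ++ ys) = pvPick (pvLMax xs) (pvLMax ys) := by
  simp only [pvLMax, List.foldl_append]
  rw [pvFoldPick ys]
  rfl

theorem pvTP_append (xs ys : List (List (String × Int))) :
    pvTP (xs ++ ys) = pvTP xs ++ pvTP ys := by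
  simp [pvTP, List.filter_append]

theorem pvPR_append (xs ys : List (List (String × Int))) :
    pvPR (xs ++ ys) = pvPR xs ++ pvPR ys := by
  simp [pvPR, List.filter_append]

-- the divide-and-conquer recursion computes the optional maxima of A's two rank lists
theorem pvMaxima_eq (lst : List (List (String × Int))) :
    pvMaxima lst = (pvLMax (pvTP lst), pvLMax (pvPR lst)) := by
  induction lst using pvMaxima.induct with
  | case1 => rw [pvMaxima]; rfl
  | case2 l r hr h0 =>
    rw [pvMaxima]
    simp only [hr, if_pos h0]
    have hsr : pvTruthy (some r) = true := by simp [pvTruthy, h0]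
    by_cases htp : pvTruthy (List.lookup "is_top_premium" l) = true <;>
      by_cases hp : pvTruthy (List.lookup "is_premium" l) = true <;>
        simp [pvTP, pvPR, pvLMax, pvPick, htp, hp, hsr, hr]
  | case3 l r hr h0 =>
    rw [pvMaxima]
    simp only [hr]
    rw [if_neg h0]
    have hsr : pvTruthy (some r) = false := by simp [pvTruthy]; omega
    simp [pvTP, pvPR, pvLMax, hsr, hr]
  | case4 l hl =>
    rw [pvMaxima]
    simp [pvTP, pvPR, pvLMax, pvTruthy, hl]
  | case5 a b t lst mid ih1 ih2 =>
    rw [pvMaxima, ih1, ih2]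
    have key : (pvLMax (pvTP (List.take mid lst ++ List.drop mid lst)),
                pvLMax (pvPR (List.take mid lst ++ List.drop mid lst)))
        = (pvPick (pvLMax (pvTP (List.take mid lst))) (pvLMax (pvTP (List.drop mid lst))),
           pvPick (pvLMax (pvPR (List.take mid lst))) (pvLMax (pvPR (List.drop mid lst)))) := by
      rw [pvTP_append, pvPR_append, pvLMax_append, pvLMax_append]
    rw [List.take_append_drop] at key
    exact key.symm

-- relate pvLMax to A's max?-based ceiling computation
theorem pvLMax_cons (x : Int) (t : List Int) :
    pvLMax (x :: t) = some (t.foldl max x) := by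
  suffices h : ∀ (t : List Int) (x : Int), t.foldl (fun o r => pvPick o (some r)) (some x) = some (t.foldl max x) by
    simpa [pvLMax, pvPick] using h t x
  intro t
  induction t with
  | nil => intro x; rfl
  | cons r t ih =>
    intro x
    simp only [List.foldl_cons]
    rw [pvPick_some, ih]

-- A's conditional ceiling equals B's match on the optional maximum
theorem pvCeil (xs : List Int) :
    (if xs ≠ [] then (PySem.List.max? xs (fun y => y)).getD 0 + 1 else 1)
    = (match pvLMax xs with | some m => m + 1 | none => (1 : Int)) := by
  cases xs with
  | nil => rfl
  | cons x t => simp [PySem.List.max?_id_cons, pvLMax_cons]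

-- ===== VERDICT (by name: the statement is the Claim_ definition above) =====
theorem calculate_tier_ceilings_spec : Claim_equal_calculate_tier_ceilings := by
  intro listings _
  unfold Spec_calculate_tier_ceilings calculate_tier_ceilings calculate_tier_ceilings_alt
  rw [pvMaxima_eq]
  show [("top_premium", (1:Int)),
        ("premium", if pvTP listings ≠ [] then (PySem.List.max? (pvTP listings) (fun y => y)).getD 0 + 1 else 1),
        ("standard", if pvPR listings ≠ [] then (PySem.List.max? (pvPR listings) (fun y => y)).getD 0 + 1 else 1)]
      = [("top_premium", (1:Int)),
        ("premium", match pvLMax (pvTP listings) with | some m => m + 1 | none => (1:Int)),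
        ("standard", match pvLMax (pvPR listings) with | some m => m + 1 | none => (1:Int))]
  rw [pvCeil, pvCeil]
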